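-- pv_equiv track=rewrite | github.com/jmathies/util-process-top-crashes | crashes.py | prettyBetaVersions
-- ===== SOURCE A (Python) =====
-- def prettyBetaVersions(verList):
--   verList.sort()
--   betaDict = dict()
--
--   for s in verList:
--     mver = s.split('.')[0]
--     if mver not in betaDict.keys():
--       betaDict[mver] = list()
--
--     try:
--       bver = s.split('b',1)[1]
--     except:
--       bver = 'rc' # RC's '94.0'
--
--     betaDict[mver].append(bver)
--
--   result = ''
--   for ver in betaDict.keys():
--     betaDict[ver].sort()
--     result += ver + ' ['
--     for beta in betaDict[ver]:
--       result += beta + ','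
--     result = result.strip(',')
--     result += '] '
--   return result
-- ===== SOURCE B (Python) =====
-- # B: replaces A's one-pass dict-of-lists grouping by an ordered-dedup of majors plus a
-- # per-major filter scan, and replaces A's string accumulator with strip(',') repair by
-- # direct ','.join formatting (alternative decomposition; sorts verList in place like A).
-- def _major(s):
--     return s.split('.')[0]
--
-- def _beta(s):
--     parts = s.split('b', 1)
--     return parts[1] if len(parts) > 1 else 'rc'
--
-- def prettyBetaVersions(verList):
--     verList.sort()
--     majors = list(dict.fromkeys(_major(s) for s in verList))
--     parts = [m + ' [' + ','.join(sorted(_beta(s) for s in verList if _major(s) == m)) + '] '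
--              for m in majors]
--     return ''.join(parts)
-- ===== Notes on version B (the rewrite author's own statement) =====
-- stated objective: alternative
-- what changed: B drops A's incrementally built dict of beta lists and its append-comma-then-result.strip(',') formatting, instead deduplicating the major versions once and, for each major, collecting its betas by a filter pass and joining them with ','.join.
-- intended difference: On lists whose largest beta token inside some major group ends with ',' (or a group of two or more versions whose beta tokens are all empty, or whose smallest version's major starts with ','), A's result.strip(',') also deletes those commas that belong to the data, e.g. A returns '1b, [] ' for ['1b,'] while B returns '1b, [,] ', which keeps the data comma and is the intended formatting. — e.g. on prettyBetaVersions(["1b,"]): A returns "1b, [] ", B returns "1b, [,] "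
import Mathlib
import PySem

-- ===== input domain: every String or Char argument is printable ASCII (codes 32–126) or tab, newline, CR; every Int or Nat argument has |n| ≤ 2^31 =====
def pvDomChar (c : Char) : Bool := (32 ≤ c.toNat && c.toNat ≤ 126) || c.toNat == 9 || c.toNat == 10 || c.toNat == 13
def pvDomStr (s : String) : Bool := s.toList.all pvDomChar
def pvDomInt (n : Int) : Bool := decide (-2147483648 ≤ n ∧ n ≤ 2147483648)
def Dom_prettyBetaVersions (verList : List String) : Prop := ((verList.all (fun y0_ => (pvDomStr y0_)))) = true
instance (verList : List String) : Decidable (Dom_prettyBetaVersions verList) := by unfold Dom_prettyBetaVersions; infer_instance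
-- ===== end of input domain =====

-- B replaces A's dict-of-lists accumulator and strip(',') repair by dedup-majors + per-major
-- filter + ','.join (alternative decomposition); both sort verList in place, equivalence is
-- about the return value. A's strip(',') also eats data commas; see D_ below.


-- ===== PORT A =====
def mverOf (s : String) : List Char := (PySem.Chars.splitOn s.toList ['.']).headD []  -- s.split('.')[0]

def bverOf (s : String) : List Char :=
  match PySem.List.pyGet? (PySem.Chars.splitOnMax s.toList ['b'] 1) 1 with
  | some b => b                                                          -- s.split('b',1)[1]
  | none => ['r', 'c']                                                   -- except: 'rc'

def prettyBetaVersions (verList : List String) : String :=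
  let L := PySem.List.sorted verList (fun s => s) false      -- verList.sort()
  let betaDict := L.foldl (fun d s =>
      let mver := mverOf s
      let d := if d.contains mver then d else d.insert mver ([] : List (List Char))
      let bver := bverOf s
      d.insert mver (d.getD mver [] ++ [bver])) PySem.Dict.empty
  let result := betaDict.keys.foldl (fun result ver =>
      let betas := PySem.List.sorted (betaDict.getD ver []) (fun x => x) false
      let result := result ++ ver ++ [' ', '[']
      let result := betas.foldl (fun result beta => result ++ beta ++ [',']) result
      let result := PySem.Chars.stripChars result [',']
      result ++ [']', ' ']) []
  String.ofList result

-- ===== PORT B =====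
def betaOf (s : String) : List Char :=
  match PySem.Chars.splitOnMax s.toList ['b'] 1 with
  | _ :: b :: _ => b
  | _ => ['r', 'c']

def prettyBetaVersions_alt (verList : List String) : String :=
  let L := PySem.List.sorted verList (fun s => s) false      -- verList.sort()
  let majors := PySem.List.dedup (L.map (fun s => mverOf s))
  let parts := majors.map (fun m =>
      let betas := PySem.List.sorted
        ((L.filter (fun s => mverOf s == m)).map (fun s => betaOf s))
        (fun x => x) false
      m ++ [' ', '['] ++ PySem.Chars.join [','] betas ++ [']', ' '])
  String.ofList (PySem.Chars.join [] parts)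

-- ===== PRECONDITION & SPEC =====
-- On these inputs A's result.strip(',') deletes commas that belong to the data: when the
-- lexicographically largest beta token of some major group ends with ',' (or a group of >= 2
-- versions has only empty beta tokens, or the smallest version's major starts with ','),
-- A drops those commas (e.g. A: '1b, [] ' on ['1b,']) while B keeps them ('1b, [,] '),
-- which is the intended formatting.
def D_prettyBetaVersions (verList : List String) : Prop :=
  ∃ s ∈ verList,
    ((∀ t ∈ verList, ¬ t.toList < s.toList) ∧ (mverOf s).head? = some ',')
    ∨ ((∀ t ∈ verList, mverOf t = mverOf s → ¬ bverOf s < bverOf t) ∧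
        ((bverOf s).getLast? = some ',' ∨
          (bverOf s = [] ∧ 2 ≤ verList.countP (fun t => mverOf t == mverOf s))))

instance (verList : List String) : Decidable (D_prettyBetaVersions verList) := by
  unfold D_prettyBetaVersions; infer_instance

def Spec_prettyBetaVersions (verList : List String) (out : String) : Prop :=
  ¬ D_prettyBetaVersions verList → out = prettyBetaVersions_alt verList
instance (verList : List String) (out : String) : Decidable (Spec_prettyBetaVersions verList out) := by unfold Spec_prettyBetaVersions; infer_instance

def pvDiffWitness_prettyBetaVersions : List String := ["1b,"]
def pvDiffWitnessOut_prettyBetaVersions : String × String := ("1b, [] ", "1b, [,] ")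

-- ===== CLAIM (what is proved, stated in full; the proofs are below) =====
def Claim_unchanged_prettyBetaVersions : Prop := ∀ (verList : List String), Dom_prettyBetaVersions verList → Spec_prettyBetaVersions verList (prettyBetaVersions verList)
def Claim_changed_prettyBetaVersions : Prop := Dom_prettyBetaVersions (pvDiffWitness_prettyBetaVersions) ∧ D_prettyBetaVersions (pvDiffWitness_prettyBetaVersions) ∧ prettyBetaVersions (pvDiffWitness_prettyBetaVersions) = pvDiffWitnessOut_prettyBetaVersions.1 ∧ prettyBetaVersions_alt (pvDiffWitness_prettyBetaVersions) = pvDiffWitnessOut_prettyBetaVersions.2 ∧ pvDiffWitnessOut_prettyBetaVersions.1 ≠ pvDiffWitnessOut_prettyBetaVersions.2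

-- ===== LEMMAS AND PROOFS =====

-- Names for the pieces both ports compute.
def pvL (v : List String) : List String := PySem.List.sorted v (fun s => s) false
def pvM (v : List String) : List (List Char) := PySem.Set.ofList ((pvL v).map (fun s => mverOf s))
def pvGrp (v : List String) (m : List Char) : List (List Char) :=
  ((pvL v).filter (fun s => mverOf s == m)).map (fun s => betaOf s)
def pvBts (v : List String) (m : List Char) : List (List Char) :=
  PySem.List.sorted (pvGrp v m) (fun x => x) false
def pvJ (v : List String) (m : List Char) : List Char := PySem.Chars.join [','] (pvBts v m)
def pvP (v : List String) (m : List Char) : List Char := m ++ [' ', '['] ++ pvJ v m ++ [']', ' ']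
def pvDictStepA (d : PySem.Dict (List Char) (List (List Char))) (s : String) :
    PySem.Dict (List Char) (List (List Char)) :=
  let mver := mverOf s
  let d := if d.contains mver then d else d.insert mver ([] : List (List Char))
  let bver := bverOf s
  d.insert mver (d.getD mver [] ++ [bver])
def pvDict (v : List String) : PySem.Dict (List Char) (List (List Char)) :=
  ((pvL v).map (fun s => (mverOf s, betaOf s))).foldl
    (fun d p => d.modify p.1 [] (fun x => x ++ [p.2])) PySem.Dict.empty
def pvStepA (v : List String) (r m : List Char) : List Char :=
  PySem.Chars.stripChars (r ++ m ++ [' ', '['] ++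
    ((pvBts v m).flatMap (fun b => b ++ [',']))) [','] ++ [']', ' ']

-- small generic list fact used below
theorem pv_getLast_append_right (l r : List Char) (h : r ≠ []) :
    (l ++ r).getLast? = r.getLast? := by
  induction l with
  | nil => rfl
  | cons a t ih =>
      rcases htr : t ++ r with _ | ⟨x, xs⟩
      · rcases List.append_eq_nil_iff.mp htr with ⟨-, h2⟩
        exact absurd h2 h
      · rw [List.cons_append, htr, List.getLast?_cons_cons, ← htr, ih]

theorem pv_bver_eq (s : String) : bverOf s = betaOf s := by
  rcases h : PySem.Chars.splitOnMax s.toList ['b'] 1 with _ | ⟨a, _ | ⟨b, t⟩⟩ <;>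
    simp [bverOf, betaOf, h, PySem.List.pyGet?, PySem.List.pyIdx?]

theorem pv_step_eq (d : PySem.Dict (List Char) (List (List Char))) (s : String) :
    pvDictStepA d s = d.modify (mverOf s) [] (fun x => x ++ [betaOf s]) := by
  show (if d.contains (mverOf s) then d else d.insert (mverOf s) []).insert (mverOf s)
      ((if d.contains (mverOf s) then d else d.insert (mverOf s) []).getD (mverOf s) [] ++
        [bverOf s]) = d.modify (mverOf s) [] (fun x => x ++ [betaOf s])
  rw [pv_bver_eq]
  by_cases hc : d.contains (mverOf s) = true
  · simp only [hc, if_true, PySem.Dict.modify]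
  · have hcf : d.contains (mverOf s) = false := by simpa using hc
    simp only [hcf, Bool.false_eq_true, if_false, PySem.Dict.modify,
      PySem.Dict.insert_insert_self, PySem.Dict.getD_insert_self]
    have hg := PySem.Dict.getD_of_not_contains d [] hcf
    rw [hg]

theorem pv_dict_eq (v : List String) :
    (pvL v).foldl pvDictStepA PySem.Dict.empty = pvDict v := by
  unfold pvDict
  rw [List.foldl_map]
  apply PySem.List.foldl_congr_mem
  intro d s _
  exact pv_step_eq d s

theorem pv_update_nil {a : Type} [BEq a] (xs : List a) :
    PySem.Set.update ([] : PySem.Set a) xs = PySem.Set.ofList xs := by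
  rw [PySem.Set.ofList_eq_foldl]; rfl

theorem pv_keys_eq (v : List String) : (pvDict v).keys = pvM v := by
  unfold pvDict pvM
  rw [PySem.Dict.keys_foldl_modify_key]
  rw [PySem.Dict.keys_empty, pv_update_nil, List.map_map]
  simp [Function.comp_def]

theorem pv_getD_eq (v : List String) (m : List Char) : (pvDict v).getD m [] = pvGrp v m := by
  unfold pvDict pvGrp
  rw [PySem.Dict.getD_foldl_modify_append]
  simp [List.filter_map, List.map_map, Function.comp_def]

theorem pv_A_shape (v : List String) :
    prettyBetaVersions v = String.ofList ((pvM v).foldl (pvStepA v) []) := by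
  have e : prettyBetaVersions v = String.ofList
      ((((pvL v).foldl pvDictStepA PySem.Dict.empty).keys).foldl (fun result ver =>
        PySem.Chars.stripChars
          ((PySem.List.sorted (((pvL v).foldl pvDictStepA PySem.Dict.empty).getD ver [])
              (fun x => x) false).foldl (fun result beta => result ++ beta ++ [','])
            (result ++ ver ++ [' ', '['])) [','] ++ [']', ' ']) []) := rfl
  rw [e, pv_dict_eq, pv_keys_eq]
  congr 1
  apply PySem.List.foldl_congr_mem
  intro r m _
  rw [pv_getD_eq]
  have e2a : (pvBts v m).foldl (fun result beta => result ++ beta ++ [','])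
        (r ++ m ++ [' ', '['])
      = (pvBts v m).foldl (fun acc b => acc ++ (b ++ [','])) (r ++ m ++ [' ', '[']) := by
    apply PySem.List.foldl_congr_mem
    intro acc b _
    rw [List.append_assoc]
  show PySem.Chars.stripChars ((pvBts v m).foldl (fun result beta => result ++ beta ++ [','])
      (r ++ m ++ [' ', '['])) [','] ++ [']', ' '] = pvStepA v r m
  rw [e2a, PySem.List.foldl_append_eq_flatMap]
  rfl

theorem pv_B_shape (v : List String) :
    prettyBetaVersions_alt v = String.ofList (PySem.Chars.join [] ((pvM v).map (pvP v))) := rfl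

theorem pv_join_cons_cons (sep b c : List Char) (t : List (List Char)) :
    PySem.Chars.join sep (b :: c :: t) = b ++ sep ++ PySem.Chars.join sep (c :: t) := by
  simp [PySem.Chars.join, List.intercalate, List.intersperse]

theorem pv_join_singleton (sep b : List Char) : PySem.Chars.join sep [b] = b := by
  simp [PySem.Chars.join, List.intercalate, List.intersperse]

theorem pv_join_nil (ps : List (List Char)) : PySem.Chars.join [] ps = ps.flatten := by
  induction ps with
  | nil => rfl
  | cons p t ih =>
      cases t with
      | nil => simp
      | cons q u => rw [pv_join_cons_cons, List.flatten_cons, ← ih]; simp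

theorem pv_flatMap_comma (b : List Char) (t : List (List Char)) :
    (b :: t).flatMap (fun x => x ++ [',']) = PySem.Chars.join [','] (b :: t) ++ [','] := by
  induction t generalizing b with
  | nil => simp
  | cons c u ih =>
      rw [List.flatMap_cons, ih c, pv_join_cons_cons]
      simp

theorem pv_dropWhile_head {p : Char → Bool} {l : List Char}
    (h : ∀ c, l.head? = some c → p c = false) : List.dropWhile p l = l := by
  cases l with
  | nil => rfl
  | cons x t => rw [List.dropWhile_cons, h x rfl]; simp

theorem pv_comma_head (y : List Char) (h : y.head? ≠ some ',') :
    ∀ c, y.head? = some c → ([','].contains c) = false := by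
  intro c hc
  have hne : c ≠ ',' := fun h' => h (h' ▸ hc)
  simp [hne]

theorem pv_stripA (y : List Char) (h1 : y.head? ≠ some ',') (h2 : y.getLast? ≠ some ',') :
    PySem.Chars.stripChars y [','] = y := by
  show (List.dropWhile (fun c => [','].contains c)
    (List.dropWhile (fun c => [','].contains c) y).reverse).reverse = y
  rw [pv_dropWhile_head (pv_comma_head y h1)]
  rw [pv_dropWhile_head (pv_comma_head y.reverse (by rwa [List.head?_reverse]))]
  exact List.reverse_reverse y

theorem pv_stripB (y : List Char) (h0 : y ≠ []) (h1 : y.head? ≠ some ',')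
    (h2 : y.getLast? ≠ some ',') :
    PySem.Chars.stripChars (y ++ [',']) [','] = y := by
  show (List.dropWhile (fun c => [','].contains c)
    (List.dropWhile (fun c => [','].contains c) (y ++ [','])).reverse).reverse = y
  have hy1 : (y ++ [',']).head? ≠ some ',' := by
    rwa [List.head?_append_of_ne_nil _ h0]
  rw [pv_dropWhile_head (pv_comma_head _ hy1)]
  rw [List.reverse_append]
  show (List.dropWhile (fun c => [','].contains c) (',' :: y.reverse)).reverse = y
  have hdc : List.dropWhile (fun c => [','].contains c) (',' :: y.reverse)
      = List.dropWhile (fun c => [','].contains c) y.reverse := by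
    rw [List.dropWhile_cons, if_pos (by simp)]
  rw [hdc, pv_dropWhile_head (pv_comma_head y.reverse (by rwa [List.head?_reverse]))]
  exact List.reverse_reverse y

theorem pv_step_lemma (v : List String) (m r : List Char)
    (hr : r = [] ∨ (r.head? ≠ some ',' ∧ r.getLast? = some ' '))
    (hm : r = [] → m.head? ≠ some ',')
    (hJ : (pvJ v m).getLast? ≠ some ',') :
    pvStepA v r m = r ++ pvP v m := by
  have hx0 : (r ++ m ++ [' ', '[']) ≠ [] := by simp
  have hxh : (r ++ m ++ [' ', '[']).head? ≠ some ',' := by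
    by_cases hre : r = []
    · subst hre
      simp only [List.nil_append]
      cases m with
      | nil => simp
      | cons a t =>
          rw [List.head?_append_of_ne_nil _ (by simp)]
          exact hm rfl
    · rcases hr with h | ⟨h, _⟩
      · exact absurd h hre
      · rcases r with _ | ⟨a, t⟩
        · exact absurd rfl hre
        · simp only [List.cons_append, List.head?_cons] at h ⊢
          exact h
  have hxl : (r ++ m ++ [' ', '[']).getLast? = some '[' := by simp
  unfold pvStepA
  cases hb : pvBts v m with
  | nil =>
      have hJn : pvJ v m = [] := by
        unfold pvJ
        rw [hb]
        rfl
      simp only [List.flatMap_nil, List.append_nil]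
      rw [pv_stripA _ hxh (by rw [hxl]; simp)]
      simp [pvP, hJn]
  | cons b t =>
      have hbj : pvJ v m = PySem.Chars.join [','] (b :: t) := by unfold pvJ; rw [hb]
      rw [pv_flatMap_comma, ← hbj]
      have assoc : r ++ m ++ [' ', '['] ++ (pvJ v m ++ [',']) =
          (r ++ m ++ [' ', '['] ++ pvJ v m) ++ [','] := by simp
      rw [assoc]
      have hyh : (r ++ m ++ [' ', '['] ++ pvJ v m).head? ≠ some ',' := by
        cases hj : pvJ v m with
        | nil => rw [List.append_nil]; exact hxh
        | cons c u =>
            rw [List.head?_append_of_ne_nil _ hx0]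
            exact hxh
      have hyl : (r ++ m ++ [' ', '['] ++ pvJ v m).getLast? ≠ some ',' := by
        cases hj : pvJ v m with
        | nil =>
            rw [List.append_nil, hxl]
            decide
        | cons c u =>
            rw [pv_getLast_append_right _ _ (by simp)]
            rw [← hj]
            exact hJ
      rw [pv_stripB _ (by simp) hyh hyl]
      simp [pvP]

theorem pv_loop_lemma (v : List String) (Ms : List (List Char)) :
    ∀ r : List Char,
    (∀ m ∈ Ms, (pvJ v m).getLast? ≠ some ',') →
    (r = [] → ∀ m0, Ms.head? = some m0 → m0.head? ≠ some ',') →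
    (r ≠ [] → r.head? ≠ some ',' ∧ r.getLast? = some ' ') →
    Ms.foldl (pvStepA v) r = r ++ (Ms.map (pvP v)).flatten := by
  induction Ms with
  | nil => intro r _ _ _; simp
  | cons m t ih =>
      intro r hJ hm hr
      rw [List.foldl_cons]
      rw [pv_step_lemma v m r
        (by
          by_cases h : r = []
          · exact Or.inl h
          · exact Or.inr (hr h))
        (fun h => hm h m rfl) (hJ m (by simp))]
      have hPne : pvP v m ≠ [] := by simp [pvP]
      have hPlast : (pvP v m).getLast? = some ' ' := by
        have e : pvP v m = (m ++ [' ', '['] ++ pvJ v m ++ [']']) ++ [' '] := by simp [pvP]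
        rw [e, pv_getLast_append_right _ _ (by simp)]
        rfl
      have hPhead : r = [] → (pvP v m).head? ≠ some ',' := by
        intro h
        have hm' := hm h m rfl
        unfold pvP
        cases m with
        | nil => simp
        | cons a u =>
            simp only [List.cons_append, List.head?_cons] at hm' ⊢
            exact hm'
      rw [ih (r ++ pvP v m) (fun x hx => hJ x (List.mem_cons_of_mem m hx))
        (fun h => absurd h (by simp [hPne]))
        (fun _ => by
          constructor
          · by_cases h : r = []
            · subst h
              simp only [List.nil_append]
              exact hPhead rfl
            · rw [List.head?_append_of_ne_nil _ h]
              exact (hr h).1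
          · rw [pv_getLast_append_right _ _ hPne]
            exact hPlast)]
      simp

-- core `<` on `List Char` is `List.Lex (· < ·)`, also the order of Mathlib's
-- `LinearOrder (List Char)`; bridge the `sorted` calls between any two such instances.
theorem pv_sorted_congr {α κ : Type} (i1 i2 : LT κ) (d1 : @DecidableLT κ i1)
    (d2 : @DecidableLT κ i2) (hiff : ∀ a b : κ, @LT.lt κ i1 a b ↔ @LT.lt κ i2 a b)
    (xs : List α) (key : α → κ) :
    @PySem.List.sorted α κ i1 d1 xs key false = @PySem.List.sorted α κ i2 d2 xs key false := by
  rw [@PySem.List.sorted_eq_foldl_insertBy α κ i1 d1 xs key,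
    @PySem.List.sorted_eq_foldl_insertBy α κ i2 d2 xs key]
  congr 1
  funext acc x
  congr 1
  funext a b
  exact decide_eq_decide.mpr (hiff _ _)

theorem pv_bts_pairwise (v : List String) (m : List Char) :
    List.Pairwise (fun a b : List Char => ¬ List.Lex (· < ·) b a) (pvBts v m) := by
  unfold pvBts
  exact (pv_sorted_congr _ _ _ _
      (fun a b : List Char => (List.lt_iff_lex_lt a b).trans Iff.rfl)
      (pvGrp v m) (fun x => x)) ▸
    ((PySem.List.sorted_pairwise (pvGrp v m) (fun x => x)).imp
      (fun hab => not_lt.mpr hab))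

theorem pv_lex_irrefl (x : List Char) : ¬ List.Lex (· < ·) x x := fun h =>
  absurd ((List.lt_iff_lex_lt x x).mpr h) (lt_irrefl x)

theorem pv_getLast_max : ∀ (l : List (List Char)),
    List.Pairwise (fun a b : List Char => ¬ List.Lex (· < ·) b a) l →
    ∀ (x : List Char), l.getLast? = some x →
    ∀ y ∈ l, ¬ List.Lex (· < ·) x y := by
  intro l
  induction l with
  | nil =>
      intro _ x hx
      simp at hx
  | cons a t ih =>
      intro hp x hx
      rcases List.pairwise_cons.mp hp with ⟨ha, ht⟩
      cases t with
      | nil =>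
          have hax : a = x := by simpa using hx
          subst hax
          intro y hy
          rw [List.mem_singleton] at hy
          subst hy
          exact pv_lex_irrefl _
      | cons b u =>
          rw [List.getLast?_cons_cons] at hx
          intro y hy
          rcases List.mem_cons.mp hy with rfl | hy'
          · have hxm : x ∈ b :: u := List.mem_of_getLast? hx
            exact fun hlex => (ha x hxm) hlex
          · exact ih ht x hx y hy'

theorem pv_join_eq_nil (bs : List (List Char)) (h : PySem.Chars.join [','] bs = []) :
    bs = [] ∨ bs = [[]] := by
  cases bs with
  | nil => exact Or.inl rfl
  | cons b t =>
      cases t with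
      | nil =>
          rw [pv_join_singleton] at h
          exact Or.inr (by rw [h])
      | cons c u =>
          rw [pv_join_cons_cons] at h
          simp at h

theorem pv_join_last (bs : List (List Char))
    (h : (PySem.Chars.join [','] bs).getLast? = some ',') :
    ∃ lb, bs.getLast? = some lb ∧
      (lb.getLast? = some ',' ∨ (lb = [] ∧ 2 ≤ bs.length)) := by
  induction bs with
  | nil => simp [PySem.Chars.join, List.intercalate] at h
  | cons b t ih =>
      cases t with
      | nil =>
          rw [pv_join_singleton] at h
          exact ⟨b, by simp, Or.inl h⟩
      | cons c u =>
          rw [pv_join_cons_cons] at h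
          by_cases hz : PySem.Chars.join [','] (c :: u) = []
          · rcases pv_join_eq_nil _ hz with h' | h'
            · simp at h'
            · have hc : c = [] := by
                have h2 : c :: u = [[]] := h'
                simpa using (List.cons_eq_cons.mp h2).1
              have hu : u = [] := by
                have h2 : c :: u = [[]] := h'
                simpa using (List.cons_eq_cons.mp h2).2
              subst hc hu
              exact ⟨[], by simp, Or.inr ⟨rfl, by simp⟩⟩
          · rw [pv_getLast_append_right _ _ hz] at h
            rcases ih h with ⟨lb, hlb, hdis⟩
            refine ⟨lb, by rw [List.getLast?_cons_cons]; exact hlb, ?_⟩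
            rcases hdis with h' | ⟨h1, _⟩
            · exact Or.inl h'
            · exact Or.inr ⟨h1, by simp⟩

theorem pv_mem_sortedL (v : List String) (s : String) : s ∈ pvL v ↔ s ∈ v :=
  (PySem.List.sorted_perm v (fun s => s) false).mem_iff

theorem pv_hJ_of_notD (v : List String) (hD : ¬ D_prettyBetaVersions v) :
    ∀ m ∈ pvM v, (pvJ v m).getLast? ≠ some ',' := by
  intro m hm hlast
  rcases pv_join_last _ hlast with ⟨lb, hlb, hdis⟩
  have hbp : (pvBts v m).Perm (pvGrp v m) :=
    PySem.List.sorted_perm (pvGrp v m) (fun x => x) false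
  have hlbmem : lb ∈ pvGrp v m := hbp.mem_iff.mp (List.mem_of_getLast? hlb)
  rcases List.mem_map.mp hlbmem with ⟨s, hsf, hsg⟩
  rcases List.mem_filter.mp hsf with ⟨hsL, hsm⟩
  have hsm' : mverOf s = m := by simpa using hsm
  have hsv : s ∈ v := (pv_mem_sortedL v s).mp hsL
  have hmax : ∀ t ∈ v, mverOf t = mverOf s → ¬ bverOf s < bverOf t := by
    intro t htv htm
    have htL : t ∈ pvL v := (pv_mem_sortedL v t).mpr htv
    have htg : betaOf t ∈ pvGrp v m := by
      apply List.mem_map_of_mem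
      apply List.mem_filter.mpr
      exact ⟨htL, by simp [htm, hsm']⟩
    have htb : betaOf t ∈ pvBts v m := hbp.mem_iff.mpr htg
    have hno := pv_getLast_max _ (pv_bts_pairwise v m) lb hlb _ htb
    rw [pv_bver_eq, pv_bver_eq, hsg]
    intro hlt
    exact hno ((List.lt_iff_lex_lt _ _).mp hlt)
  apply hD
  refine ⟨s, hsv, Or.inr ⟨hmax, ?_⟩⟩
  rcases hdis with hend | ⟨hnil, hlen⟩
  · refine Or.inl ?_
    rw [pv_bver_eq, hsg]
    exact hend
  · refine Or.inr ⟨by rw [pv_bver_eq, hsg]; exact hnil, ?_⟩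
    have h1 : (pvBts v m).length = (pvGrp v m).length := hbp.length_eq
    have h3 : (v.countP (fun t => mverOf t == mverOf s))
        = ((pvL v).filter (fun t => mverOf t == m)).length := by
      rw [hsm', List.countP_eq_length_filter]
      exact (((PySem.List.sorted_perm v (fun s => s) false).filter _).length_eq).symm
    have h4 : ((pvL v).filter (fun t => mverOf t == m)).length = (pvBts v m).length := by
      rw [h1]
      unfold pvGrp
      rw [List.length_map]
    rw [h3, h4]
    exact hlen

theorem pv_foldl_add_head {a : Type} [BEq a] (t : List a) :
    ∀ s : PySem.Set a, s ≠ [] →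
      (t.foldl PySem.Set.add s).head? = s.head? ∧ t.foldl PySem.Set.add s ≠ [] := by
  induction t with
  | nil => intro s hs; exact ⟨rfl, hs⟩
  | cons x u ih =>
      intro s hs
      rw [List.foldl_cons]
      have hadd : (PySem.Set.add s x).head? = s.head? ∧ PySem.Set.add s x ≠ [] := by
        by_cases hc : List.contains s x = true
        · simp [PySem.Set.add, PySem.Set.contains, hc, hs]
        · have hcf : List.contains s x = false := by simpa using hc
          constructor
          · show (if PySem.Set.contains s x = true then s else s ++ [x]).head? = s.head?
            simp only [PySem.Set.contains, hcf, Bool.false_eq_true, if_false]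
            exact List.head?_append_of_ne_nil _ hs
          · show (if PySem.Set.contains s x = true then s else s ++ [x]) ≠ []
            simp [PySem.Set.contains, hcf, hs]
      rcases ih (PySem.Set.add s x) hadd.2 with ⟨h1, h2⟩
      exact ⟨h1.trans hadd.1, h2⟩

theorem pv_ofList_head {a : Type} [BEq a] (xs : List a) :
    (PySem.Set.ofList xs).head? = xs.head? := by
  rw [PySem.Set.ofList_eq_foldl]
  cases xs with
  | nil => rfl
  | cons x t =>
      rw [List.foldl_cons]
      have hadd : PySem.Set.add ([] : PySem.Set a) x = [x] := rfl
      rw [hadd]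
      exact (pv_foldl_add_head t [x] (by simp)).1

theorem pv_head_min (l : List String)
    (hp : List.Pairwise (fun a b : String => a ≤ b) l)
    (x : String) (hx : l.head? = some x) : ∀ t ∈ l, x ≤ t := by
  cases l with
  | nil => simp at hx
  | cons a u =>
      simp only [List.head?_cons, Option.some.injEq] at hx
      subst hx
      intro t ht
      rcases List.mem_cons.mp ht with rfl | ht'
      · exact le_refl t
      · exact (List.pairwise_cons.mp hp).1 t ht'

theorem pv_head_of_notD (v : List String) (hD : ¬ D_prettyBetaVersions v) :
    ∀ m0, (pvM v).head? = some m0 → m0.head? ≠ some ',' := by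
  intro m0 hm0 hcomma
  have h1 : ((pvL v).map (fun s => mverOf s)).head? = some m0 := by
    rw [← pv_ofList_head]
    exact hm0
  rw [List.head?_map] at h1
  rcases Option.map_eq_some_iff.mp h1 with ⟨hd, hhd, hfhd⟩
  have hdv : hd ∈ v := (pv_mem_sortedL v hd).mp (List.mem_of_mem_head? hhd)
  apply hD
  refine ⟨hd, hdv, Or.inl ⟨?_, ?_⟩⟩
  · intro t htv
    have htL : t ∈ pvL v := (pv_mem_sortedL v t).mpr htv
    have hpw : List.Pairwise (fun a b : String => a ≤ b) (pvL v) := by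
      simpa using PySem.List.sorted_pairwise v (fun s => s)
    have hle : hd ≤ t := pv_head_min (pvL v) hpw hd hhd t htL
    intro hlt
    have hlt' : t < hd := by
      rw [String.lt_iff_toList_lt]
      exact hlt
    exact absurd hle (not_le_of_gt hlt')
  · rw [hfhd]
    exact hcomma

-- ===== VERDICT (by name: the statement is the Claim_ definition above) =====
theorem prettyBetaVersions_spec : Claim_unchanged_prettyBetaVersions := by
  intro v _ hD
  show prettyBetaVersions v = prettyBetaVersions_alt v
  rw [pv_A_shape, pv_B_shape, pv_join_nil]
  congr 1
  exact pv_loop_lemma v (pvM v) [] (pv_hJ_of_notD v hD)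
    (fun _ => pv_head_of_notD v hD) (fun h => absurd rfl h)

theorem prettyBetaVersions_changed : Claim_changed_prettyBetaVersions := by
  unfold Claim_changed_prettyBetaVersions; decide
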